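-- pv_equiv track=rewrite | github.com/posl/comment_recommendation | script/split_gen/4_time/zh/178_D/6.py | solve
-- ===== SOURCE A (Python) =====
-- def solve(S):
--     dp = [0] * (S + 1)
--     dp[0] = 1
--     for i in range(3, S + 1):
--         for j in range(S - i + 1):
--             dp[i + j] += dp[j]
--             dp[i + j] %= 10**9 + 7
--     return dp[-1]
-- ===== SOURCE B (Python) =====
-- MOD = 10 ** 9 + 7
--
--
-- def solve(S):
--     # DP over the number of parts: cur[n] = #partitions of n into exactly k
--     # parts, each part >= 3 (mod MOD), via the recurrence
--     #   e(n, k) = e(n-3, k-1) + e(n-k, k)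
--     # (smallest part is 3: drop it; all parts >= 4: subtract 1 from each part).
--     # The answer is the sum of the rows' last entries over k = 0 .. S // 3.
--     prev = [1] + [0] * S          # k = 0 row: e(n, 0) = (n == 0)
--     ans = prev[S]
--     for k in range(1, S // 3 + 1):
--         cur = [0] * (S + 1)
--         for n in range(3 * k, S + 1):
--             cur[n] = (prev[n - 3] + cur[n - k]) % MOD
--         ans = (ans + cur[S]) % MOD
--         prev = cur
--     return ans
-- ===== Notes on version B (the rewrite author's own statement) =====
-- stated objective: faster
-- what changed: A runs an in-place unbounded-knapsack sweep over every part size i = 3..S; B instead does DP over the number of parts, building for each k = 1..S//3 the row of counts of partitions into exactly k parts each >= 3 via e(n,k) = e(n-3,k-1) + e(n-k,k), and sums the rows' entries at S.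
import Mathlib
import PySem

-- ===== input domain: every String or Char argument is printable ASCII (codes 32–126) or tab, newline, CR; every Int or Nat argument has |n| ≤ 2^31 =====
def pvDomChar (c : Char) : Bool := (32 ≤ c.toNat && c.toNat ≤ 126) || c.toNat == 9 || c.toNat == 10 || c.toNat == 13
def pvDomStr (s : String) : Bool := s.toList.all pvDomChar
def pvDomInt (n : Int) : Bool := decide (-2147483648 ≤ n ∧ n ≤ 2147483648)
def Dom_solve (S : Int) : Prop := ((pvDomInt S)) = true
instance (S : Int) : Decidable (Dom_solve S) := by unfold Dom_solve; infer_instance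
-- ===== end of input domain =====

-- B is a different exact algorithm: DP over the number of parts (rows e(·,k)) instead of A's
-- in-place unbounded-knapsack sweep over part sizes; same return value on every S ≥ 0.

-- ===== PORT A =====
-- literal transliteration of Source A: dp = [0]*(S+1); dp[0] = 1; nested sweep; return dp[-1]
def solve (S : Int) : Int :=
  let dp : List Int := PySem.List.pySetD (List.replicate (S + 1).toNat (0 : Int)) 0 1
  let dp := (PySem.List.pyRange 3 (S + 1) 1).foldl (fun dp i =>
    (PySem.List.pyRange 0 (S - i + 1) 1).foldl (fun dp j =>
      -- dp[i+j] += dp[j]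
      let dp := PySem.List.pySetD dp (i + j)
        (PySem.List.pyGetD dp (i + j) 0 + PySem.List.pyGetD dp j 0)
      -- dp[i+j] %= 10**9 + 7
      PySem.List.pySetD dp (i + j)
        (PySem.Int.mod (PySem.List.pyGetD dp (i + j) 0) (10 ^ 9 + 7))) dp) dp
  PySem.List.pyGetD dp (-1) 0

-- ===== PORT B =====
-- literal transliteration of Source B: rows of "exactly k parts, each ≥ 3", answer accumulated at S
def solve_alt (S : Int) : Int :=
  let prev : List Int := 1 :: List.replicate S.toNat (0 : Int)
  let ans : Int := PySem.List.pyGetD prev S 0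
  let st := (PySem.List.pyRange 1 (PySem.Int.floordiv S 3 + 1) 1).foldl
    (fun (st : List Int × Int) k =>
      let cur : List Int := List.replicate (S + 1).toNat (0 : Int)
      let cur := (PySem.List.pyRange (3 * k) (S + 1) 1).foldl (fun cur n =>
        PySem.List.pySetD cur n
          (PySem.Int.mod (PySem.List.pyGetD st.1 (n - 3) 0 + PySem.List.pyGetD cur (n - k) 0)
            (10 ^ 9 + 7))) cur
      (cur, PySem.Int.mod (st.2 + PySem.List.pyGetD cur S 0) (10 ^ 9 + 7)))
    (prev, ans)
  st.2

-- ===== PRECONDITION & SPEC =====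
-- Pre_ excludes exactly the inputs where A raises: for S < 0, `dp[0] = 1` is an IndexError ([0]*(S+1) is empty).
def Pre_solve (S : Int) : Prop := 0 ≤ S
instance (S : Int) : Decidable (Pre_solve S) := by unfold Pre_solve; infer_instance
def pvWitness_solve : Int := 6
def Spec_solve (S : Int) (out : Int) : Prop := out = solve_alt S
instance (S : Int) (out : Int) : Decidable (Spec_solve S out) := by unfold Spec_solve; infer_instance

-- ===== CLAIM (what is proved, stated in full; the proofs are below) =====
def Claim_equal_solve : Prop := ∀ (S : Int), Dom_solve S → Pre_solve S → Spec_solve S (solve S)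

-- ===== LEMMAS AND PROOFS =====

-- the modulus
def MM : Int := 10 ^ 9 + 7

-- Wc n m = number of partitions of n into parts lying in [3, m]  (A's recurrence: peel the largest part)
def Wc (n m : ℕ) : ℕ :=
  if m < 3 then (if n = 0 then 1 else 0)
  else Wc n (m - 1) + (if m ≤ n then Wc (n - m) m else 0)
termination_by (m, n)
decreasing_by
  · exact Prod.Lex.left _ _ (by omega)
  · exact Prod.Lex.right _ (by omega)

-- Gc n k m = number of partitions of n into exactly k parts lying in [3, m]
def Gc (n k m : ℕ) : ℕ :=
  if m < 3 then (if n = 0 ∧ k = 0 then 1 else 0)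
  else Gc n k (m - 1) + (if m ≤ n ∧ 1 ≤ k then Gc (n - m) (k - 1) m else 0)
termination_by (m, n)
decreasing_by
  · exact Prod.Lex.left _ _ (by omega)
  · exact Prod.Lex.right _ (by omega)

-- Hc n k m = number of partitions of n into exactly k parts lying in [4, m]
def Hc (n k m : ℕ) : ℕ :=
  if m < 4 then (if n = 0 ∧ k = 0 then 1 else 0)
  else Hc n k (m - 1) + (if m ≤ n ∧ 1 ≤ k then Hc (n - m) (k - 1) m else 0)
termination_by (m, n)
decreasing_by
  · exact Prod.Lex.left _ _ (by omega)
  · exact Prod.Lex.right _ (by omega)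

-- Ec n k = number of partitions of n into exactly k parts, each ≥ 3  (B's recurrence)
def Ec (n k : ℕ) : ℕ :=
  if k = 0 then (if n = 0 then 1 else 0)
  else if n < 3 * k then 0
  else Ec (n - 3) (k - 1) + Ec (n - k) k
termination_by (k, n)
decreasing_by
  · exact Prod.Lex.left _ _ (by omega)
  · exact Prod.Lex.right _ (by omega)

lemma Wc_base (n m : ℕ) (h : m < 3) : Wc n m = if n = 0 then 1 else 0 := by
  rw [Wc]; simp [h]

lemma Wc_high (n m : ℕ) (h3 : ¬ m < 3) (hn : n < m) : Wc n m = Wc n (m - 1) := by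
  rw [Wc]; simp [h3, show ¬ m ≤ n by omega]

lemma Wc_rec (n m : ℕ) (h3 : ¬ m < 3) (hm : m ≤ n) :
    Wc n m = Wc n (m - 1) + Wc (n - m) m := by
  rw [Wc]; simp [h3, hm]

lemma Gc_k_zero (n m : ℕ) : Gc n 0 m = if n = 0 then 1 else 0 := by
  rw [Gc]
  by_cases h3 : m < 3
  · simp [h3]
  · simp [h3, Gc_k_zero n (m - 1)]
termination_by m
decreasing_by omega

lemma Gc_vanish (n k m : ℕ) (h : n < 3 * k) : Gc n k m = 0 := by
  rw [Gc]
  by_cases h3 : m < 3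
  · simp [h3, show ¬ (n = 0 ∧ k = 0) by omega]
  · by_cases hc : m ≤ n ∧ 1 ≤ k
    · rw [if_pos hc, Gc_vanish n k (m - 1) h, Gc_vanish (n - m) (k - 1) m (by omega)]
      simp [h3]
    · rw [if_neg hc, Gc_vanish n k (m - 1) h]
      simp [h3]
termination_by (m, n)
decreasing_by
  · exact Prod.Lex.left _ _ (by omega)
  · exact Prod.Lex.right _ (by omega)
  · exact Prod.Lex.left _ _ (by omega)

lemma Hc_k_zero (n m : ℕ) : Hc n 0 m = if n = 0 then 1 else 0 := by
  rw [Hc]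
  by_cases h4 : m < 4
  · simp [h4]
  · simp [h4, Hc_k_zero n (m - 1)]
termination_by m
decreasing_by omega

lemma Gc_saturate (n k m m' : ℕ) (h3 : 3 ≤ m) (hn : n ≤ m) (hm : m ≤ m') :
    Gc n k m' = Gc n k m := by
  by_cases he : m' = m
  · rw [he]
  · rw [Gc]
    rw [show ((if m' < 3 then (if n = 0 ∧ k = 0 then 1 else 0)
        else Gc n k (m' - 1) + (if m' ≤ n ∧ 1 ≤ k then Gc (n - m') (k - 1) m' else 0))) =
        Gc n k (m' - 1) from by
      simp [show ¬ m' < 3 by omega, show ¬ (m' ≤ n ∧ 1 ≤ k) by omega]]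
    exact Gc_saturate n k m (m' - 1) h3 hn (by omega)
termination_by m'
decreasing_by omega

-- (I): peel off a smallest part equal to 3
lemma Gc_smallest (m n k : ℕ) (h3 : 3 ≤ m) (hk : 1 ≤ k) :
    Gc n k m = (if 3 ≤ n then Gc (n - 3) (k - 1) m else 0) + Hc n k m := by
  by_cases hm : m = 3
  · subst hm
    rw [Gc, if_neg (show ¬ (3:ℕ) < 3 by omega),
      show Gc n k (3 - 1) = 0 from by
        rw [Gc]; simp [show (3:ℕ) - 1 < 3 by omega, show ¬ (n = 0 ∧ k = 0) by omega],
      Hc, if_pos (show (3:ℕ) < 4 by omega), if_neg (show ¬ (n = 0 ∧ k = 0) by omega)]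
    by_cases hn : 3 ≤ n
    · rw [if_pos (show 3 ≤ n ∧ 1 ≤ k from ⟨hn, hk⟩), if_pos hn]; omega
    · rw [if_neg (show ¬ (3 ≤ n ∧ 1 ≤ k) by omega), if_neg hn]
  · have h4 : 4 ≤ m := by omega
    rw [Gc, if_neg (show ¬ m < 3 by omega), Gc_smallest (m - 1) n k (by omega) hk]
    conv_rhs => rw [Hc]
    rw [if_neg (show ¬ m < 4 by omega)]
    rw [show Gc (n - 3) (k - 1) m = Gc (n - 3) (k - 1) (m - 1) +
        (if m ≤ n - 3 ∧ 1 ≤ k - 1 then Gc (n - 3 - m) (k - 1 - 1) m else 0) from by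
      rw [Gc, if_neg (show ¬ m < 3 by omega)]]
    by_cases hc : m ≤ n ∧ 1 ≤ k
    · have hn3 : 3 ≤ n := by omega
      rw [if_pos hc, if_pos hc, if_pos hn3, if_pos hn3]
      by_cases hk2 : 2 ≤ k
      · rw [Gc_smallest m (n - m) (k - 1) h3 (by omega)]
        by_cases hnm : 3 ≤ n - m
        · rw [if_pos hnm, if_pos (show m ≤ n - 3 ∧ 1 ≤ k - 1 by omega),
            show n - m - 3 = n - 3 - m by omega]
          ring
        · rw [if_neg hnm, if_neg (show ¬ (m ≤ n - 3 ∧ 1 ≤ k - 1) by omega)]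
          ring
      · have hk1 : k = 1 := by omega
        subst hk1
        rw [if_neg (show ¬ (m ≤ n - 3 ∧ 1 ≤ 1 - 1) by omega)]
        simp only [Nat.sub_self]
        rw [Gc_k_zero, Hc_k_zero, Gc_k_zero (n - m) m]
        ring
    · rw [if_neg hc, if_neg hc]
      by_cases hn3 : 3 ≤ n
      · rw [if_pos hn3, if_pos hn3, if_neg (show ¬ (m ≤ n - 3 ∧ 1 ≤ k - 1) by omega)]
        ring
      · rw [if_neg hn3, if_neg hn3]
        ring
termination_by (m, n)
decreasing_by
  · exact Prod.Lex.left _ _ (by omega)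
  · exact Prod.Lex.right _ (by omega)

-- (II): subtract one from each of the k parts
lemma Hc_to_Gc (m n k : ℕ) :
    Hc n k m = if k ≤ n then Gc (n - k) k (m - 1) else 0 := by
  by_cases h4 : m < 4
  · rw [Hc, Gc]
    simp only [if_pos h4, show m - 1 < 3 by omega, if_true]
    split_ifs <;> omega
  · rw [Hc, if_neg h4, Hc_to_Gc (m - 1) n k]
    by_cases hmn : m ≤ n ∧ 1 ≤ k
    · rw [if_pos hmn, Hc_to_Gc m (n - m) (k - 1)]
      by_cases hkn : k ≤ n
      · rw [if_pos hkn, if_pos hkn,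
          show Gc (n - k) k (m - 1) = Gc (n - k) k (m - 1 - 1) +
              (if m - 1 ≤ n - k ∧ 1 ≤ k then Gc (n - k - (m - 1)) (k - 1) (m - 1) else 0) from by
            rw [Gc]; simp [show ¬ m - 1 < 3 by omega]]
        congr 1
        by_cases hc : k - 1 ≤ n - m
        · rw [if_pos hc, if_pos (show m - 1 ≤ n - k ∧ 1 ≤ k by omega),
            show n - m - (k - 1) = n - k - (m - 1) by omega]
        · rw [if_neg hc, if_neg (show ¬ (m - 1 ≤ n - k ∧ 1 ≤ k) by omega)]
      · rw [if_neg hkn, if_neg hkn, if_neg (show ¬ k - 1 ≤ n - m by omega)]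
    · rw [if_neg hmn]
      by_cases hkn : k ≤ n
      · rw [if_pos hkn, if_pos hkn,
          show Gc (n - k) k (m - 1) = Gc (n - k) k (m - 1 - 1) from by
            rw [Gc, if_neg (show ¬ m - 1 < 3 by omega),
              if_neg (show ¬ (m - 1 ≤ n - k ∧ 1 ≤ k) by omega)]
            simp]
        simp
      · rw [if_neg hkn, if_neg hkn]
termination_by (m, n)
decreasing_by
  · exact Prod.Lex.left _ _ (by omega)
  · exact Prod.Lex.right _ (by omega)

lemma Ec_vanish (n k : ℕ) (hk : k ≠ 0) (h : n < 3 * k) : Ec n k = 0 := by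
  rw [Ec]; simp [hk, h]

lemma Ec_eq_Gc (k n : ℕ) : Ec n k = Gc n k n := by
  by_cases hk : k = 0
  · subst hk; rw [Ec, Gc_k_zero]; simp
  · by_cases hv : n < 3 * k
    · rw [Ec_vanish n k hk hv, Gc_vanish n k n hv]
    · have hk1 : 1 ≤ k := by omega
      have hn3 : 3 ≤ n := by omega
      rw [Ec, if_neg hk, if_neg hv, Ec_eq_Gc (k - 1) (n - 3), Ec_eq_Gc k (n - k)]
      rw [Gc_smallest n n k hn3 hk1, if_pos hn3, Hc_to_Gc n n k,
        if_pos (show k ≤ n by omega)]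
      congr 1
      · by_cases hk2 : 2 ≤ k
        · exact (Gc_saturate (n - 3) (k - 1) (n - 3) n (by omega) (le_refl _) (by omega)).symm
        · have hk1' : k = 1 := by omega
          subst hk1'
          simp only [Nat.sub_self]
          rw [Gc_k_zero, Gc_k_zero]
      · by_cases hk2 : 2 ≤ k
        · exact (Gc_saturate (n - k) k (n - k) (n - 1) (by omega) (le_refl _) (by omega)).symm
        · have hk1' : k = 1 := by omega
          subst hk1'
          rfl
termination_by (k, n)
decreasing_by
  · exact Prod.Lex.left _ _ (by omega)
  · exact Prod.Lex.right _ (by omega)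

lemma Wc_eq_sum_Gc (m n : ℕ) : Wc n m = ∑ k ∈ Finset.range (n + 1), Gc n k m := by
  by_cases h3 : m < 3
  · rw [Wc_base n m h3]
    by_cases hn : n = 0
    · subst hn
      rw [Finset.sum_range_one, Gc]
      simp [h3]
    · rw [if_neg hn]
      symm
      apply Finset.sum_eq_zero
      intro k _
      rw [Gc]
      simp [h3, hn]
  · rw [Wc, if_neg h3, Wc_eq_sum_Gc (m - 1) n]
    have hG : ∀ k, Gc n k m = Gc n k (m - 1) +
        (if m ≤ n ∧ 1 ≤ k then Gc (n - m) (k - 1) m else 0) := fun k => by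
      rw [Gc, if_neg h3]
    rw [Finset.sum_congr rfl (fun k _ => hG k), Finset.sum_add_distrib]
    congr 1
    by_cases hmn : m ≤ n
    · rw [if_pos hmn, Wc_eq_sum_Gc m (n - m)]
      conv_rhs => rw [Finset.sum_range_succ']
      rw [if_neg (show ¬ (m ≤ n ∧ 1 ≤ 0) by omega), add_zero,
        Finset.sum_congr rfl (fun k _ =>
          show (if m ≤ n ∧ 1 ≤ k + 1 then Gc (n - m) (k + 1 - 1) m else 0) = Gc (n - m) k m from by
            rw [if_pos ⟨hmn, by omega⟩]; simp)]
      apply Finset.sum_subset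
      · intro x hx
        simp only [Finset.mem_range] at hx ⊢
        omega
      · intro k hk1 hk2
        simp only [Finset.mem_range] at hk1 hk2
        exact Gc_vanish _ _ _ (by omega)
    · rw [if_neg hmn]
      symm
      apply Finset.sum_eq_zero
      intro k _
      rw [if_neg (show ¬ (m ≤ n ∧ 1 ≤ k) by omega)]
termination_by (m, n)
decreasing_by
  · exact Prod.Lex.left _ _ (by omega)
  · exact Prod.Lex.right _ (by omega)

lemma bridge (N : ℕ) : Wc N N = ∑ k ∈ Finset.range (N / 3 + 1), Ec N k := by
  rw [Wc_eq_sum_Gc N N, Finset.sum_congr rfl (fun k _ => (Ec_eq_Gc k N).symm)]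
  symm
  apply Finset.sum_subset
  · intro x hx
    simp only [Finset.mem_range] at hx ⊢
    omega
  · intro k hk1 hk2
    simp only [Finset.mem_range] at hk1 hk2
    have hk0 : k ≠ 0 := by omega
    have h3k : N < 3 * k := by
      have := (Nat.div_lt_iff_lt_mul (show 0 < 3 by norm_num)).1 (show N / 3 < k by omega)
      omega
    exact Ec_vanish N k hk0 h3k

-- characterizations of the two ports
-- ==== helpers ====
def vA (i n : ℕ) : ℤ := (Wc n i : ℤ) % MM

lemma getD_set_lt (xs : List ℤ) (i j : ℕ) (v : ℤ) (hi : i < xs.length) :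
    (xs.set i v).getD j 0 = if j = i then v else xs.getD j 0 := by
  rw [List.getD_eq_getElem?_getD, List.getD_eq_getElem?_getD, List.getElem?_set]
  by_cases h : j = i
  · simp [h, hi]
  · simp [h, show ¬ i = j from fun hh => h hh.symm]

lemma foldl_pyRange_succ {α : Type} (f : α → ℤ → α) (x : α) (a : ℤ) (t : ℕ) :
    (PySem.List.pyRange a (a + (t : ℤ) + 1) 1).foldl f x =
      f ((PySem.List.pyRange a (a + (t : ℤ)) 1).foldl f x) (a + t) := by
  rw [PySem.List.pyRange_one_succ_right (by omega : a ≤ a + (t : ℤ)), List.foldl_append]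
  rfl

-- the inner sweep of A for part i = I, first t steps
def innerFoldA (I : ℕ) (dp : List ℤ) (t : ℕ) : List ℤ :=
  (PySem.List.pyRange 0 (t : ℤ) 1).foldl (fun dp j =>
    let dp := PySem.List.pySetD dp ((I : ℤ) + j)
      (PySem.List.pyGetD dp ((I : ℤ) + j) 0 + PySem.List.pyGetD dp j 0)
    PySem.List.pySetD dp ((I : ℤ) + j)
      (PySem.Int.mod (PySem.List.pyGetD dp ((I : ℤ) + j) 0) (10 ^ 9 + 7))) dp

lemma innerFoldA_succ (I : ℕ) (dp : List ℤ) (t : ℕ) :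
    innerFoldA I dp (t + 1) =
      (let dp2 := PySem.List.pySetD (innerFoldA I dp t) ((I : ℤ) + t)
        (PySem.List.pyGetD (innerFoldA I dp t) ((I : ℤ) + t) 0 +
          PySem.List.pyGetD (innerFoldA I dp t) (t : ℤ) 0)
      PySem.List.pySetD dp2 ((I : ℤ) + t)
        (PySem.Int.mod (PySem.List.pyGetD dp2 ((I : ℤ) + t) 0) (10 ^ 9 + 7))) := by
  rw [innerFoldA, innerFoldA, show ((t + 1 : ℕ) : ℤ) = 0 + (t : ℤ) + 1 by push_cast; ring,
    foldl_pyRange_succ]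
  simp

lemma innerFoldA_len (I : ℕ) (dp : List ℤ) (t : ℕ) :
    (innerFoldA I dp t).length = dp.length := by
  induction t with
  | zero => rw [innerFoldA]; rw [PySem.List.pyRange_one_eq_nil (by omega)]; rfl
  | succ t ih => rw [innerFoldA_succ]; simp [ih]

lemma vA_low (i n : ℕ) (h3 : ¬ i < 3) (h : n < i) : vA i n = vA (i - 1) n := by
  unfold vA; rw [Wc_high n i h3 h]

lemma vA_step (I t : ℕ) (h3 : 3 ≤ I) :
    (vA (I - 1) (I + t) + vA I t) % MM = vA I (I + t) := by
  unfold vA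
  rw [Wc_rec (I + t) I (by omega) (by omega), Nat.add_sub_cancel_left]
  push_cast
  conv_rhs => rw [Int.add_emod]

lemma innerFoldA_getD (N I : ℕ) (hI3 : 3 ≤ I) (dp : List ℤ) (hlen : dp.length = N + 1)
    (hdp : ∀ n, n ≤ N → dp.getD n 0 = vA (I - 1) n) :
    ∀ t, I + t ≤ N + 1 → ∀ n, n ≤ N →
      (innerFoldA I dp t).getD n 0 = if n < I + t then vA I n else vA (I - 1) n := by
  intro t
  induction t with
  | zero =>
    intro _ n hn
    rw [innerFoldA, PySem.List.pyRange_one_eq_nil (by omega)]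
    simp only [List.foldl_nil]
    rw [hdp n hn]
    by_cases h : n < I + 0
    · rw [if_pos h, vA_low I n (by omega) (by omega)]
    · rw [if_neg h]
  | succ t ih =>
    intro ht n hn
    have ht' : I + t ≤ N + 1 := by omega
    have hlen' : (innerFoldA I dp t).length = N + 1 := by rw [innerFoldA_len, hlen]
    have htN : t ≤ N := by omega
    rw [innerFoldA_succ]
    simp only [show (I : ℤ) + (t : ℤ) = ((I + t : ℕ) : ℤ) by push_cast; ring,
      PySem.List.pySetD_natCast, PySem.List.pyGetD_natCast]
    rw [PySem.Int.mod_eq_emod_of_pos (by norm_num)]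
    by_cases h : n = I + t
    · subst h
      rw [getD_set_lt _ _ _ _ (by simp only [List.length_set]; rw [hlen']; omega), if_pos rfl,
        getD_set_lt _ _ _ _ (by rw [hlen']; omega), if_pos rfl,
        ih ht' (I + t) (by omega), if_neg (by omega), ih ht' t htN, if_pos (by omega),
        show ((10 : ℤ) ^ 9 + 7) = MM from rfl, vA_step I t hI3, if_pos (by omega)]
    · rw [getD_set_lt _ _ _ _ (by simp only [List.length_set]; rw [hlen']; omega), if_neg h,
        getD_set_lt _ _ _ _ (by rw [hlen']; omega), if_neg h, ih ht' n hn]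
      by_cases h2 : n < I + t
      · rw [if_pos h2, if_pos (by omega)]
      · rw [if_neg h2, if_neg (by omega)]

def outerFoldA (N : ℕ) (dp : List ℤ) (u : ℕ) : List ℤ :=
  (PySem.List.pyRange 3 (3 + (u : ℤ)) 1).foldl (fun dp i =>
    (PySem.List.pyRange 0 ((N : ℤ) - i + 1) 1).foldl (fun dp j =>
      let dp := PySem.List.pySetD dp (i + j)
        (PySem.List.pyGetD dp (i + j) 0 + PySem.List.pyGetD dp j 0)
      PySem.List.pySetD dp (i + j)
        (PySem.Int.mod (PySem.List.pyGetD dp (i + j) 0) (10 ^ 9 + 7))) dp) dp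

lemma outerFoldA_inv (N : ℕ) (dp : List ℤ) (hlen : dp.length = N + 1)
    (hdp : ∀ n, n ≤ N → dp.getD n 0 = vA 2 n) :
    ∀ u, 3 + u ≤ N + 1 →
      (outerFoldA N dp u).length = N + 1 ∧
      ∀ n, n ≤ N → (outerFoldA N dp u).getD n 0 = vA (2 + u) n := by
  intro u
  induction u with
  | zero =>
    intro _
    rw [outerFoldA, PySem.List.pyRange_one_eq_nil (by simp)]
    exact ⟨hlen, hdp⟩
  | succ u ih =>
    intro hu
    have hu' : 3 + u ≤ N + 1 := by omega
    obtain ⟨ihlen, ihget⟩ := ih hu'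
    have hpeel : outerFoldA N dp (u + 1) =
        innerFoldA (3 + u) (outerFoldA N dp u) (N + 1 - (3 + u)) := by
      rw [outerFoldA, outerFoldA,
        show (3 : ℤ) + ((u + 1 : ℕ) : ℤ) = 3 + (u : ℤ) + 1 by push_cast; ring,
        foldl_pyRange_succ]
      rw [show (N : ℤ) - (3 + (u : ℤ)) + 1 = ((N + 1 - (3 + u) : ℕ) : ℤ) by omega]
      rfl
    rw [hpeel]
    constructor
    · rw [innerFoldA_len]; exact ihlen
    · intro n hn
      rw [innerFoldA_getD N (3 + u) (by omega) _ ihlen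
        (by
          intro n' hn'
          rw [show (3 + u - 1 : ℕ) = 2 + u by omega]
          exact ihget n' hn')
        (N + 1 - (3 + u)) (by omega) n hn]
      rw [if_pos (by omega)]
      rw [show (3 + u : ℕ) = 2 + (u + 1) by omega]

lemma solveA_eq (N : ℕ) : solve (N : Int) = ((Wc N N : ℤ) % MM) := by
  have hcast : ((N : ℤ) + 1).toNat = N + 1 := by omega
  have hD0 : PySem.List.pySetD (List.replicate ((N : ℤ) + 1).toNat (0 : ℤ)) 0 1 =
      (List.replicate (N + 1) (0 : ℤ)).set 0 1 := by
    rw [show (0 : ℤ) = ((0 : ℕ) : ℤ) from rfl, PySem.List.pySetD_natCast, hcast]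
  have hD0len : ((List.replicate (N + 1) (0 : ℤ)).set 0 1).length = N + 1 := by simp
  have hD0get : ∀ n, n ≤ N → ((List.replicate (N + 1) (0 : ℤ)).set 0 1).getD n 0 = vA 2 n := by
    intro n hn
    rw [getD_set_lt _ _ _ _ (by simp)]
    unfold vA
    rw [Wc_base n 2 (by omega)]
    by_cases h : n = 0
    · subst h
      rw [if_pos rfl, if_pos rfl]
      norm_num [MM]
    · rw [if_neg h, if_neg (by exact_mod_cast h)]
      simp [hn]
  have finalRead : ∀ (res : List ℤ), res.length = N + 1 →
      PySem.List.pyGetD res (-1) 0 = res.getD N 0 := by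
    intro res hlen
    have hne : res ≠ [] := by intro h; rw [h] at hlen; simp at hlen
    rw [PySem.List.pyGetD_neg_one res 0 hne, List.getLast_eq_getElem,
      List.getD_eq_getElem _ _ (by omega)]
    congr 1
    omega
  by_cases hN : 2 ≤ N
  · have hinv := outerFoldA_inv N ((List.replicate (N + 1) (0 : ℤ)).set 0 1) hD0len hD0get
      (N - 2) (by omega)
    unfold solve
    rw [hD0, show (N : ℤ) + 1 = 3 + ((N - 2 : ℕ) : ℤ) by omega]
    change PySem.List.pyGetD (outerFoldA N ((List.replicate (N + 1) (0 : ℤ)).set 0 1) (N - 2))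
      (-1) 0 = _
    rw [finalRead _ hinv.1, hinv.2 N (le_refl N), show 2 + (N - 2) = N by omega]
    rfl
  · unfold solve
    rw [hD0, PySem.List.pyRange_one_eq_nil (by omega)]
    change PySem.List.pyGetD ((List.replicate (N + 1) (0 : ℤ)).set 0 1) (-1) 0 = _
    rw [finalRead _ hD0len, hD0get N (le_refl N)]
    unfold vA
    rw [Wc_base N 2 (by omega), Wc_base N N (by omega)]

def vB (k n : ℕ) : ℤ := (Ec n k : ℤ) % MM

lemma vB_vanish (K n : ℕ) (hK : K ≠ 0) (h : n < 3 * K) : vB K n = 0 := by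
  unfold vB; rw [Ec_vanish n K hK h]; simp

lemma vB_step (K t : ℕ) (hK : 1 ≤ K) :
    (vB (K - 1) (3 * K + t - 3) + vB K (2 * K + t)) % MM = vB K (3 * K + t) := by
  unfold vB
  rw [show Ec (3 * K + t) K = Ec (3 * K + t - 3) (K - 1) + Ec (2 * K + t) K from by
    rw [Ec, if_neg (by omega), if_neg (by omega), show 3 * K + t - K = 2 * K + t by omega]]
  push_cast
  conv_rhs => rw [Int.add_emod]

def innerFoldB (K : ℕ) (prev cur : List ℤ) (t : ℕ) : List ℤ :=
  (PySem.List.pyRange (3 * (K : ℤ)) (3 * (K : ℤ) + (t : ℤ)) 1).foldl (fun cur n =>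
    PySem.List.pySetD cur n
      (PySem.Int.mod
        (PySem.List.pyGetD prev (n - 3) 0 + PySem.List.pyGetD cur (n - (K : ℤ)) 0)
        (10 ^ 9 + 7))) cur

lemma innerFoldB_succ (K : ℕ) (prev cur : List ℤ) (t : ℕ) :
    innerFoldB K prev cur (t + 1) =
      PySem.List.pySetD (innerFoldB K prev cur t) (3 * (K : ℤ) + t)
        (PySem.Int.mod
          (PySem.List.pyGetD prev (3 * (K : ℤ) + t - 3) 0 +
            PySem.List.pyGetD (innerFoldB K prev cur t) (3 * (K : ℤ) + t - (K : ℤ)) 0)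
          (10 ^ 9 + 7)) := by
  rw [innerFoldB, innerFoldB, show (((t + 1 : ℕ)) : ℤ) = (t : ℤ) + 1 by push_cast; ring,
    ← add_assoc, foldl_pyRange_succ]

lemma innerFoldB_len (K : ℕ) (prev cur : List ℤ) (t : ℕ) :
    (innerFoldB K prev cur t).length = cur.length := by
  induction t with
  | zero => rw [innerFoldB]; rw [PySem.List.pyRange_one_eq_nil (by omega)]; rfl
  | succ t ih => rw [innerFoldB_succ]; simp [ih]

lemma innerFoldB_getD (N K : ℕ) (hK : 1 ≤ K) (_h3K : 3 * K ≤ N) (prev cur : List ℤ)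
    (hplen : prev.length = N + 1) (hprev : ∀ n, n ≤ N → prev.getD n 0 = vB (K - 1) n)
    (hclen : cur.length = N + 1) (hcur : ∀ n, n ≤ N → cur.getD n 0 = 0) :
    ∀ t, 3 * K + t ≤ N + 1 → ∀ n, n ≤ N →
      (innerFoldB K prev cur t).getD n 0 = if n < 3 * K + t then vB K n else 0 := by
  intro t
  induction t with
  | zero =>
    intro _ n hn
    rw [innerFoldB, PySem.List.pyRange_one_eq_nil (by omega)]
    simp only [List.foldl_nil]
    rw [hcur n hn]
    by_cases h : n < 3 * K + 0
    · rw [if_pos h, vB_vanish K n (by omega) (by omega)]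
    · rw [if_neg h]
  | succ t ih =>
    intro ht n hn
    have ht' : 3 * K + t ≤ N + 1 := by omega
    have hlen' : (innerFoldB K prev cur t).length = N + 1 := by rw [innerFoldB_len, hclen]
    rw [innerFoldB_succ]
    simp only [show 3 * (K : ℤ) + (t : ℤ) = ((3 * K + t : ℕ) : ℤ) by push_cast; ring,
      show ((3 * K + t : ℕ) : ℤ) - 3 = ((3 * K + t - 3 : ℕ) : ℤ) by omega,
      show ((3 * K + t : ℕ) : ℤ) - (K : ℤ) = ((2 * K + t : ℕ) : ℤ) by omega,
      PySem.List.pySetD_natCast, PySem.List.pyGetD_natCast]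
    rw [PySem.Int.mod_eq_emod_of_pos (by norm_num)]
    rw [hprev (3 * K + t - 3) (by omega), ih ht' (2 * K + t) (by omega), if_pos (by omega)]
    rw [getD_set_lt _ _ _ _ (by rw [hlen']; omega)]
    by_cases h : n = 3 * K + t
    · subst h
      rw [if_pos rfl, show ((10 : ℤ) ^ 9 + 7) = MM from rfl, vB_step K t hK, if_pos (by omega)]
    · rw [if_neg h, ih ht' n hn]
      by_cases h2 : n < 3 * K + t
      · rw [if_pos h2, if_pos (by omega)]
      · rw [if_neg h2, if_neg (by omega)]

def outerFoldB (N : ℕ) (st : List ℤ × ℤ) (u : ℕ) : List ℤ × ℤ :=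
  (PySem.List.pyRange 1 (1 + (u : ℤ)) 1).foldl
    (fun (st : List ℤ × ℤ) k =>
      let cur : List ℤ := List.replicate (((N : ℤ)) + 1).toNat (0 : ℤ)
      let cur := (PySem.List.pyRange (3 * k) (((N : ℤ)) + 1) 1).foldl (fun cur n =>
        PySem.List.pySetD cur n
          (PySem.Int.mod (PySem.List.pyGetD st.1 (n - 3) 0 + PySem.List.pyGetD cur (n - k) 0)
            (10 ^ 9 + 7))) cur
      (cur, PySem.Int.mod (st.2 + PySem.List.pyGetD cur ((N : ℤ)) 0) (10 ^ 9 + 7))) st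

lemma outerFoldB_inv (N : ℕ) (st : List ℤ × ℤ) (hlen : st.1.length = N + 1)
    (hget : ∀ n, n ≤ N → st.1.getD n 0 = vB 0 n)
    (hans : st.2 = ((∑ k ∈ Finset.range 1, Ec N k : ℕ) : ℤ) % MM) :
    ∀ u, u ≤ N / 3 →
      (outerFoldB N st u).1.length = N + 1 ∧
      (∀ n, n ≤ N → (outerFoldB N st u).1.getD n 0 = vB u n) ∧
      (outerFoldB N st u).2 = ((∑ k ∈ Finset.range (u + 1), Ec N k : ℕ) : ℤ) % MM := by
  intro u
  induction u with
  | zero =>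
    intro _
    rw [outerFoldB, PySem.List.pyRange_one_eq_nil (by simp)]
    exact ⟨hlen, hget, hans⟩
  | succ u ih =>
    intro hu
    have hu' : u ≤ N / 3 := by omega
    have h3K : 3 * (u + 1) ≤ N := by
      have := Nat.div_mul_le_self N 3
      omega
    obtain ⟨ihlen, ihget, ihans⟩ := ih hu'
    have hcast : (((N : ℤ)) + 1).toNat = N + 1 := by omega
    have hpeel : outerFoldB N st (u + 1) =
        (innerFoldB (u + 1) (outerFoldB N st u).1 (List.replicate (N + 1) (0 : ℤ))
            (N + 1 - 3 * (u + 1)),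
          PySem.Int.mod ((outerFoldB N st u).2 +
            PySem.List.pyGetD (innerFoldB (u + 1) (outerFoldB N st u).1
              (List.replicate (N + 1) (0 : ℤ)) (N + 1 - 3 * (u + 1))) ((N : ℤ)) 0)
            (10 ^ 9 + 7)) := by
      rw [outerFoldB, outerFoldB,
        show (1 : ℤ) + ((u + 1 : ℕ) : ℤ) = 1 + (u : ℤ) + 1 by push_cast; ring,
        foldl_pyRange_succ]
      rw [show (1 : ℤ) + (u : ℤ) = ((u + 1 : ℕ) : ℤ) by push_cast; ring, hcast,
        show ((N : ℤ)) + 1 = 3 * ((u + 1 : ℕ) : ℤ) + ((N + 1 - 3 * (u + 1) : ℕ) : ℤ) by omega]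
      rfl
    have hinner := innerFoldB_getD N (u + 1) (by omega) h3K (outerFoldB N st u).1
      (List.replicate (N + 1) (0 : ℤ)) ihlen
      (by
        intro n' hn'
        rw [show (u + 1 - 1 : ℕ) = u by omega]
        exact ihget n' hn')
      (by simp) (by intro n' _; simp)
      (N + 1 - 3 * (u + 1)) (by omega)
    rw [hpeel]
    refine ⟨by rw [innerFoldB_len]; simp, ?_, ?_⟩
    · intro n hn
      rw [hinner n hn, if_pos (by omega)]
    · rw [show ((N : ℤ)) = ((N : ℕ) : ℤ) from rfl, PySem.List.pyGetD_natCast,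
        hinner N (le_refl N), if_pos (by omega), ihans,
        PySem.Int.mod_eq_emod_of_pos (by norm_num)]
      conv_rhs => rw [Finset.sum_range_succ]
      unfold vB MM
      push_cast
      omega

lemma solveB_eq (N : ℕ) :
    solve_alt (N : Int) = (((∑ k ∈ Finset.range (N / 3 + 1), Ec N k : ℕ) : ℤ) % MM) := by
  have hplen : ((1 : ℤ) :: List.replicate N 0).length = N + 1 := by simp
  have hpget : ∀ n, n ≤ N → ((1 : ℤ) :: List.replicate N 0).getD n 0 = vB 0 n := by
    intro n hn
    unfold vB
    cases n with
    | zero =>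
      rw [Ec]
      norm_num [MM]
    | succ n' =>
      rw [Ec]
      simp
  have hans0 : PySem.List.pyGetD ((1 : ℤ) :: List.replicate N 0) ((N : ℕ) : ℤ) 0 =
      ((∑ k ∈ Finset.range 1, Ec N k : ℕ) : ℤ) % MM := by
    rw [PySem.List.pyGetD_natCast, hpget N (le_refl N), Finset.sum_range_one]
    rfl
  have hfd : PySem.Int.floordiv ((N : ℕ) : ℤ) 3 + 1 = 1 + ((N / 3 : ℕ) : ℤ) := by
    rw [PySem.Int.floordiv_eq_ediv_of_pos (by norm_num),
      show ((N : ℕ) : ℤ) / 3 = ((N / 3 : ℕ) : ℤ) by omega]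
    ring
  have hinv := outerFoldB_inv N
    (1 :: List.replicate N 0, ((∑ k ∈ Finset.range 1, Ec N k : ℕ) : ℤ) % MM)
    hplen hpget rfl (N / 3) (le_refl _)
  unfold solve_alt
  dsimp only
  rw [show ((N : ℤ)).toNat = N from by omega, hans0, hfd]
  change (outerFoldB N
    (1 :: List.replicate N 0, ((∑ k ∈ Finset.range 1, Ec N k : ℕ) : ℤ) % MM) (N / 3)).2 = _
  exact hinv.2.2

-- ===== VERDICT (by name: the statement is the Claim_ definition above) =====
theorem solve_spec : Claim_equal_solve := by
  intro S _ hpre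
  unfold Spec_solve
  obtain ⟨N, rfl⟩ : ∃ N : ℕ, S = (N : Int) := ⟨S.toNat, (Int.toNat_of_nonneg hpre).symm⟩
  rw [solveA_eq, solveB_eq, bridge]
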